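-- pv_equiv track=rewrite | github.com/justinarhee/Codepath-TIP102 | unit1.py | good_pairs
-- ===== SOURCE A (Python) =====
-- def good_pairs(pile1, pile2, k):
--     count = 0
--     pile2 = [x * k for x in pile2]
--     for i in pile1:
--         for j in pile2:
--             if i % j == 0:
--                 count += 1
--     return count
-- ===== SOURCE B (Python) =====
-- def good_pairs(pile1, pile2, k):
--     # Alternative algorithm: count multiplicities once, then loop over DISTINCT values only,
--     # adding the product of multiplicities per matching distinct pair.
--     cnt1 = {}
--     for i in pile1:
--         cnt1[i] = cnt1.get(i, 0) + 1
--     cnt2 = {}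
--     for x in pile2:
--         v = x * k
--         cnt2[v] = cnt2.get(v, 0) + 1
--     total = 0
--     for i, ci in cnt1.items():
--         for v, cv in cnt2.items():
--             if i % v == 0:
--                 total += ci * cv
--     return total
-- ===== Notes on version B (the rewrite author's own statement) =====
-- stated objective: alternative
-- what changed: Instead of testing every (i, j) pair with nested loops over the raw lists, B builds frequency dictionaries of pile1 and of k*pile2 once and iterates only over distinct values, adding the product of multiplicities for each matching distinct pair; it collapses duplicates but costs the same on distinct-valued inputs.
import Mathlib
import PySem

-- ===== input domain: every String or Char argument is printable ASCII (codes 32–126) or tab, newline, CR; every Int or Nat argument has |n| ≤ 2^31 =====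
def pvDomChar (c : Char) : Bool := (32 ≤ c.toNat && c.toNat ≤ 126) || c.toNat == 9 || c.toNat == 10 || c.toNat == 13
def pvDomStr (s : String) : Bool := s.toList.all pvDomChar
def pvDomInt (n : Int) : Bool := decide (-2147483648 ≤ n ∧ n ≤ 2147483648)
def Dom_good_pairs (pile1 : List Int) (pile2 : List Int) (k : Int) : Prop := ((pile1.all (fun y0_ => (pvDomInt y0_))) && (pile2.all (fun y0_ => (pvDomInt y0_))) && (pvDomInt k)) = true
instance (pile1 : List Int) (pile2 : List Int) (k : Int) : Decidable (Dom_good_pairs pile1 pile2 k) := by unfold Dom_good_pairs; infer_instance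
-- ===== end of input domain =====

-- B replaces A's nested scan over the raw lists by frequency maps of pile1 and
-- of k*pile2 built once, looping over distinct values only and adding products
-- of multiplicities (objective: alternative algorithm, same cost on distinct data).


-- ===== PORT A =====
def good_pairs (pile1 : List Int) (pile2 : List Int) (k : Int) : Int :=
  let pile2' := pile2.map (fun x => x * k)
  pile1.foldl (fun count i =>
    pile2'.foldl (fun count j =>
      if PySem.Int.mod i j = 0 then count + 1 else count) count) 0

-- ===== PORT B =====
def good_pairs_alt (pile1 : List Int) (pile2 : List Int) (k : Int) : Int :=
  let cnt1 := pile1.foldl (fun d i => d.insert i (d.getD i 0 + 1)) PySem.Dict.empty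
  let cnt2 := pile2.foldl (fun d x => d.insert (x * k) (d.getD (x * k) 0 + 1)) PySem.Dict.empty
  cnt1.items.foldl (fun total p =>
    cnt2.items.foldl (fun total q =>
      if PySem.Int.mod p.1 q.1 = 0 then total + p.2 * q.2 else total) total) 0

-- ===== PRECONDITION & SPEC =====
-- Pre_ excludes exactly the inputs where Python A raises ZeroDivisionError:
-- pile1 nonempty and some x in pile2 with x*k == 0 (there B raises too).
def Pre_good_pairs (pile1 : List Int) (pile2 : List Int) (k : Int) : Prop :=
  pile1 = [] ∨ ∀ x ∈ pile2, x * k ≠ 0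
instance (pile1 : List Int) (pile2 : List Int) (k : Int) : Decidable (Pre_good_pairs pile1 pile2 k) := by unfold Pre_good_pairs; infer_instance
def pvWitness_good_pairs : List Int × List Int × Int := ([6, 4, 6], [2, 3], 1)
def Spec_good_pairs (pile1 : List Int) (pile2 : List Int) (k : Int) (out : Int) : Prop := out = good_pairs_alt pile1 pile2 k
instance (pile1 : List Int) (pile2 : List Int) (k : Int) (out : Int) : Decidable (Spec_good_pairs pile1 pile2 k out) := by unfold Spec_good_pairs; infer_instance

-- ===== CLAIM (what is proved, stated in full; the proofs are below) =====
def Claim_equal_good_pairs : Prop := ∀ (pile1 : List Int) (pile2 : List Int) (k : Int), Dom_good_pairs pile1 pile2 k → Pre_good_pairs pile1 pile2 k → Spec_good_pairs pile1 pile2 k (good_pairs pile1 pile2 k)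

-- ===== LEMMAS AND PROOFS =====

-- a guarded accumulating loop is the start value plus a sum of 0/weight terms
lemma foldl_add_ite_prop {β : Type} (l : List β) (p : β → Prop) [DecidablePred p]
    (w : β → Int) (a : Int) :
    l.foldl (fun acc x => if p x then acc + w x else acc) a
      = a + (l.map (fun x => if p x then w x else 0)).sum := by
  induction l generalizing a with
  | nil => simp
  | cons x t ih =>
    by_cases h : p x
    · simp [h, ih]; ring
    · simp [h, ih]

-- summing count-weighted terms over the distinct values equals summing over the list
lemma sum_over_distinct_weighted (xs : List Int) (g : Int → Int) :
    ((PySem.Set.ofList xs).map (fun x => (xs.count x : Int) * g x)).sum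
      = (xs.map g).sum := by
  rw [← List.sum_toFinset _ (PySem.Set.nodup_ofList xs), Finset.sum_list_map_count xs g]
  apply Finset.sum_congr
  · ext x; simp [PySem.Set.mem_ofList]
  · intro x hx; simp at hx; simp

lemma good_pairs_eq (pile1 : List Int) (pile2 : List Int) (k : Int) :
    good_pairs pile1 pile2 k = good_pairs_alt pile1 pile2 k := by
  unfold good_pairs good_pairs_alt
  simp only []
  rw [PySem.Dict.foldl_insert_getD_add_one_eq_counter]
  rw [show (pile2.foldl (fun d x => d.insert (x * k) (d.getD (x * k) 0 + 1)) PySem.Dict.empty)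
        = PySem.Dict.counter (pile2.map (fun x => x * k)) from by
      rw [← PySem.Dict.foldl_insert_getD_add_one_eq_counter, List.foldl_map]]
  simp only [PySem.Dict.items_counter, List.foldl_map]
  simp only [foldl_add_ite_prop, PySem.List.foldl_add, zero_add]
  have hmm : ∀ x : Int,
      (List.map (fun y => if PySem.Int.mod x (y * k) = 0 then (1 : Int) else 0) pile2)
        = List.map (fun j => if PySem.Int.mod x j = 0 then (1 : Int) else 0)
            (List.map (fun x => x * k) pile2) := by
    intro x; rw [List.map_map]; rfl
  simp only [hmm]
  rw [← sum_over_distinct_weighted pile1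
        (fun i => ((pile2.map (fun x => x * k)).map
          (fun j => if PySem.Int.mod i j = 0 then (1 : Int) else 0)).sum)]
  congr 1
  apply List.map_congr_left
  intro i _
  rw [← sum_over_distinct_weighted (pile2.map (fun x => x * k))
        (fun j => if PySem.Int.mod i j = 0 then (1 : Int) else 0)]
  rw [← List.sum_map_mul_left]
  refine congrArg List.sum (List.map_congr_left fun j _ => ?_)
  by_cases h : PySem.Int.mod i j = 0 <;> simp [h]

-- ===== VERDICT (by name: the statement is the Claim_ definition above) =====
theorem good_pairs_spec : Claim_equal_good_pairs := by
  intro pile1 pile2 k _ _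
  unfold Spec_good_pairs
  exact good_pairs_eq pile1 pile2 k
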